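-- pv_equiv track=rewrite | github.com/jennyluciav/datah_challenge_1 | poker.py | is_n_kind
-- ===== SOURCE A (Python) =====
-- from collections import Counter
--
-- def is_n_kind(n, values):
-- 	"""
-- 	Return the value of the n cards with the same rank and otherwise return None
-- 	"""
-- 	count_val = Counter(values)
-- 	sorted_count = sorted(count_val.items(), reverse=True)
-- 	for num, rep in sorted_count:
-- 		if rep == n:
-- 			return num
-- 		else:
-- 			return 0
-- ===== SOURCE B (Python) =====
-- def is_n_kind(n, values):
--     """
--     Return the value of the n cards with the same rank and otherwise return None
--     """
--     if not values:
--         return None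
--     m = max(values)
--     return m if values.count(m) == n else 0
-- ===== Notes on version B (the rewrite author's own statement) =====
-- stated objective: faster
-- what changed: Replaced the Counter build plus descending sort (whose loop only ever inspects the first sorted entry) by a direct max() and count() over the raw list.
-- outside the precondition, e.g. on is_n_kind(2, []): A returns None, B returns None
import Mathlib
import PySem

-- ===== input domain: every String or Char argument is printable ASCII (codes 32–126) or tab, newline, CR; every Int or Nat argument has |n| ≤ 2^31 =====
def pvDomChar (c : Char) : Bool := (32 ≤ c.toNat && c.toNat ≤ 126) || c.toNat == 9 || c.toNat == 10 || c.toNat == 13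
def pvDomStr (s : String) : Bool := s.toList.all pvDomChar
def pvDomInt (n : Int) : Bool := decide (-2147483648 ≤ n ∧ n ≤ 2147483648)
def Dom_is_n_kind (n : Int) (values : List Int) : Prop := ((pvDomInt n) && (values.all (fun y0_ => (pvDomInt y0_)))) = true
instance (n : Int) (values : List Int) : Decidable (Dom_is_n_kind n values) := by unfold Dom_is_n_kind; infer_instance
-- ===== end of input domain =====

-- B replaces A's Counter build plus descending sort by a direct max-and-count scan (simpler; return value only).


-- ===== PORT A =====
def is_n_kind (n : Int) (values : List Int) : Int :=
  let count_val := PySem.Dict.counter values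
  let sorted_count := PySem.List.sorted2 count_val.items (fun p => p.1) (fun p => p.2) true
  -- the for loop returns on its first iteration in either branch; empty sorted_count
  -- (Python: falls off the loop, returns None) is excluded by Pre_is_n_kind
  match sorted_count with
  | [] => 0
  | (num, rep) :: _ => if rep == n then num else 0

-- ===== PORT B =====
def is_n_kind_alt (n : Int) (values : List Int) : Int :=
  -- Source B: 'if not values: return None' is the none branch (excluded by Pre_is_n_kind)
  match PySem.List.max? values (fun x => x) with
  | none => 0
  | some m => if ((PySem.List.count values m : Int) == n) then m else 0

-- ===== PRECONDITION & SPEC =====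
-- Pre_ excludes the empty list, on which A's loop never runs and A returns None, not an Int (B returns None there too).
def Pre_is_n_kind (n : Int) (values : List Int) : Prop := values ≠ []
instance (n : Int) (values : List Int) : Decidable (Pre_is_n_kind n values) := by unfold Pre_is_n_kind; infer_instance
def pvWitness_is_n_kind : Int × List Int := (2, [3, 3, 1])

def Spec_is_n_kind (n : Int) (values : List Int) (out : Int) : Prop := out = is_n_kind_alt n values
instance (n : Int) (values : List Int) (out : Int) : Decidable (Spec_is_n_kind n values out) := by unfold Spec_is_n_kind; infer_instance

-- ===== CLAIM (what is proved, stated in full; the proofs are below) =====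
def Claim_equal_is_n_kind : Prop := ∀ (n : Int) (values : List Int), Dom_is_n_kind n values → Pre_is_n_kind n values → Spec_is_n_kind n values (is_n_kind n values)

-- ===== LEMMAS AND PROOFS =====

-- the head of an insertBy step: the new element takes the head iff it comes 'before' the old head
def pvStep {α : Type} (before : α → α → Bool) (h : Option α) (x : α) : Option α :=
  match h with
  | none => some x
  | some y => some (if before x y then x else y)

theorem pv_head?_insertBy {α : Type} (before : α → α → Bool) (x : α) (ys : List α) :
    (PySem.List.insertBy before x ys).head? = pvStep before ys.head? x := by
  cases ys with
  | nil => rfl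
  | cons y ys =>
    simp only [PySem.List.insertBy]
    by_cases h : before x y = true <;> simp [pvStep, h]

theorem pv_head?_foldl_insertBy {α : Type} (before : α → α → Bool) :
    ∀ (l : List α) (acc : List α),
      (l.foldl (fun acc x => PySem.List.insertBy before x acc) acc).head?
        = l.foldl (pvStep before) acc.head? := by
  intro l
  induction l with
  | nil => intro acc; rfl
  | cons x t ih =>
    intro acc
    simp only [List.foldl_cons]
    rw [ih, pv_head?_insertBy]

-- the comparison sorted2 … true uses, on the items of a counter
def pvBefore (a b : Int × Int) : Bool :=
  decide (b.1 < a.1) || (!decide (a.1 < b.1) && decide (b.2 < a.2))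

theorem pv_sorted2_eq_fold (xs : List (Int × Int)) :
    PySem.List.sorted2 xs (fun p => p.1) (fun p => p.2) true
      = xs.foldl (fun acc x => PySem.List.insertBy pvBefore x acc) [] := rfl

-- counter items have distinct first components, so the running head keeps the max key
theorem pv_run_max (values : List Int) :
    ∀ (S : List Int) (a : Int), a ∉ S → S.Nodup →
      (S.map (fun k => (k, (values.count k : Int)))).foldl (pvStep pvBefore)
          (some (a, (values.count a : Int)))
        = some (S.foldl max a, (values.count (S.foldl max a) : Int)) := by
  intro S
  induction S with
  | nil => intro a _ _; rfl
  | cons k S' ih =>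
    intro a ha hnd
    have hak : a ≠ k := by intro h; exact ha (h ▸ List.mem_cons_self)
    simp only [List.map_cons, List.foldl_cons]
    have hstep : pvStep pvBefore (some (a, (values.count a : Int))) (k, (values.count k : Int))
        = some (max a k, (values.count (max a k) : Int)) := by
      simp only [pvStep, pvBefore]
      rcases lt_trichotomy a k with h | h | h
      · have : max a k = k := max_eq_right h.le
        simp [h, this, not_lt.mpr h.le]
      · exact absurd h hak
      · have : max a k = a := max_eq_left h.le
        simp [h, this, not_lt.mpr h.le]
    rw [hstep]
    have hmem : max a k ∉ S' := by
      rcases max_choice a k with h | h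
      · rw [h]; intro hm; exact ha (List.mem_cons_of_mem _ hm)
      · rw [h]; exact (List.nodup_cons.mp hnd).1
    rw [ih (max a k) hmem (List.nodup_cons.mp hnd).2]

-- the two maxima agree: the fold over the dedup'd keys and the fold over the raw list
theorem pv_max_eq (v : Int) (vt : List Int) (s0 : Int) (S' : List Int)
    (hS : PySem.Set.ofList (v :: vt) = s0 :: S') :
    S'.foldl max s0 = vt.foldl max v := by
  set M := S'.foldl max s0 with hM
  set m := vt.foldl max v with hm
  have hmemS : ∀ y : Int, y ∈ v :: vt ↔ y ∈ s0 :: S' := by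
    intro y; rw [← hS, PySem.Set.mem_ofList]
  have hMmem : M ∈ v :: vt := by
    rw [hmemS]
    rcases PySem.List.foldl_max_mem S' s0 with h | h
    · rw [hM, h]; exact List.mem_cons_self
    · exact List.mem_cons_of_mem _ h
  have hmmem : m ∈ v :: vt := by
    rcases PySem.List.foldl_max_mem vt v with h | h
    · rw [hm, h]; exact List.mem_cons_self
    · exact List.mem_cons_of_mem _ h
  have hMub : ∀ y ∈ v :: vt, y ≤ M := by
    intro y hy
    rw [hmemS] at hy
    rcases List.mem_cons.mp hy with h | h
    · rw [h]; exact (PySem.List.le_foldl_max S' s0).1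
    · exact (PySem.List.le_foldl_max S' s0).2 y h
  have hmub : ∀ y ∈ v :: vt, y ≤ m := by
    intro y hy
    rcases List.mem_cons.mp hy with h | h
    · rw [h]; exact (PySem.List.le_foldl_max vt v).1
    · exact (PySem.List.le_foldl_max vt v).2 y h
  exact le_antisymm (hmub M hMmem) (hMub m hmmem)

-- ===== VERDICT (by name: the statement is the Claim_ definition above) =====
theorem is_n_kind_spec : Claim_equal_is_n_kind := by
  intro n values _ hpre
  unfold Spec_is_n_kind is_n_kind is_n_kind_alt
  cases values with
  | nil => exact absurd rfl hpre
  | cons v vt =>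
    -- the set of values is nonempty
    have hv : v ∈ PySem.Set.ofList (v :: vt) := by
      rw [PySem.Set.mem_ofList]; exact List.mem_cons_self
    have hne : PySem.Set.ofList (v :: vt) ≠ [] := by
      intro h; rw [h] at hv; simp at hv
    obtain ⟨s0, S', hSeq⟩ := List.exists_cons_of_ne_nil hne
    have hnd : (s0 :: S').Nodup := hSeq ▸ PySem.Set.nodup_ofList (v :: vt)
    -- head of the sorted counter items
    have hitems : (PySem.Dict.counter (v :: vt)).items
        = (s0 :: S').map (fun k => (k, ((v :: vt).count k : Int))) := by
      rw [PySem.Dict.items_counter, hSeq]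
    have hhead :
        (PySem.List.sorted2 (PySem.Dict.counter (v :: vt)).items
            (fun p => p.1) (fun p => p.2) true).head?
          = some (S'.foldl max s0, ((v :: vt).count (S'.foldl max s0) : Int)) := by
      rw [pv_sorted2_eq_fold, pv_head?_foldl_insertBy, hitems]
      simp only [List.map_cons, List.foldl_cons]
      have h0 : pvStep pvBefore (List.head? ([] : List (Int × Int)))
          (s0, ((v :: vt).count s0 : Int)) = some (s0, ((v :: vt).count s0 : Int)) := rfl
      rw [h0]
      exact pv_run_max (v :: vt) S' s0 (List.nodup_cons.mp hnd).1 (List.nodup_cons.mp hnd).2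
    rw [pv_max_eq v vt s0 S' hSeq] at hhead
    -- evaluate both sides
    change (match PySem.List.sorted2 (PySem.Dict.counter (v :: vt)).items
          (fun p => p.1) (fun p => p.2) true with
      | [] => (0 : Int)
      | (num, rep) :: _ => if rep == n then num else 0)
      = match PySem.List.max? (v :: vt) (fun x => x) with
        | none => (0 : Int)
        | some m => if ((PySem.List.count (v :: vt) m : Int) == n) then m else 0
    rw [PySem.List.max?_id_cons]
    cases hsc : PySem.List.sorted2 (PySem.Dict.counter (v :: vt)).items
        (fun p => p.1) (fun p => p.2) true with
    | nil => rw [hsc] at hhead; exact absurd hhead (by simp)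
    | cons p rest =>
      rw [hsc] at hhead
      simp only [List.head?_cons, Option.some.injEq] at hhead
      subst hhead
      rfl
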